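-- pv_equiv track=rewrite | github.com/FredrikAkerblom/aoc_2024 | aoc_2024/Day19/Day19.py | reduce_parts
-- ===== SOURCE A (Python) =====
-- def search(target, parts):
--     search_space = [""]
--     while len(search_space) > 0:
--         current = search_space.pop(0)
--         for part in parts:
--             potential = current + part
--             if potential == target:
--                 return True
--             if target.startswith(potential):
--                 search_space.append(potential)
--     return False
--
-- def reduce_parts(parts):
--     parts = sorted(parts, key=lambda x: -len(x))
--     i = 0
--     while i < len(parts):
--         if search(parts[i], parts[i+1:]):
--             parts.pop(i)
--             i -= 1
--         i += 1
--     return parts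
-- ===== SOURCE B (Python) =====
-- def decomposable(target, parts):
--     # word-break DP: dp[i] == True iff target[:i] is a concatenation of parts
--     n = len(target)
--     dp = [True]
--     for i in range(1, n + 1):
--         dp.append(any(len(p) >= 1 and len(p) <= i and dp[i - len(p)]
--                       and target[i - len(p):i] == p for p in parts))
--     return dp[n]
--
-- def reduce_parts(parts):
--     ps = sorted(parts, key=lambda x: -len(x))
--     return [t for i, t in enumerate(ps) if not decomposable(t, ps[i + 1:])]
-- ===== Notes on version B (the rewrite author's own statement) =====
-- stated objective: faster
-- what changed: The exponential BFS over all concatenation prefixes (search) is replaced by a word-break dynamic program over prefix positions, and the outer mutating while-loop with index rewinding by a single filter over suffixes of the sorted list.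
-- outside the precondition, e.g. on reduce_parts(['']): A returns [''], B returns []; on reduce_parts(['a', '']): A does not finish within the time limit, B returns ['a']
import Mathlib
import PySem

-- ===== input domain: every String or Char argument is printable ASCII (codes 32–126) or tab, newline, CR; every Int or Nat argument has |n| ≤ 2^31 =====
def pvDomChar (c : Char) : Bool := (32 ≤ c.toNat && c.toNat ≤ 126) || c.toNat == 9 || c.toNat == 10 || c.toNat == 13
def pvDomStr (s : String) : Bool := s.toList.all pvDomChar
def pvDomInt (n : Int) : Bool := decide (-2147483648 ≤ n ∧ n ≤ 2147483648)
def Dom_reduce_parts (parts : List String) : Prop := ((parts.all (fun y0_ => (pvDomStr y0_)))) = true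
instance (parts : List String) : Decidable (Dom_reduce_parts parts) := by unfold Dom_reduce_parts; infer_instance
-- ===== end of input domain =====

-- B replaces A's exponential memoless BFS decomposability search by a word-break DP over prefix
-- positions and the index-mutating outer while-loop by a filter over suffixes (objective: faster).

-- ===== PORT A =====
-- inner 'for part in parts' loop of search: returns none where Python 'return True' fires,
-- otherwise 'some' of the updated search_space (strings ported as their List Char, which is exact)
def searchInner (target current : List Char) : List (List Char) → List (List Char) → Option (List (List Char))
  | [], space => some space
  | p :: ps, space =>
      let potential := current ++ p
      if potential = target then none
      else if PySem.Chars.startswith target potential then searchInner target current ps (space ++ [potential])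
      else searchInner target current ps space

-- the 'while len(search_space) > 0' loop; the fuel argument only makes the (in Python possibly
-- diverging) loop structurally recursive: it is proved sufficient on Pre_ (searchAux_iff below)
def searchAux (target : List Char) (parts : List (List Char)) : Nat → List (List Char) → Bool
  | 0, _ => false
  | _ + 1, [] => false
  | fuel + 1, current :: rest =>
      match searchInner target current parts rest with
      | none => true
      | some space => searchAux target parts fuel space

def search (target : String) (parts : List String) : Bool :=
  searchAux target.toList (parts.map String.toList)
    ((parts.length + 1) ^ (target.toList.length + 1) + 1) [[]]

-- the 'while i < len(parts)' loop: parts.pop(i) is take i ++ drop (i+1) (i is in range here);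
-- 'i -= 1; i += 1' leaves i unchanged after a pop
def reduceLoop (parts : List String) (i : Nat) : List String :=
  if h : i < parts.length then
    if search parts[i] (parts.drop (i + 1)) then
      reduceLoop (parts.take i ++ parts.drop (i + 1)) i
    else
      reduceLoop parts (i + 1)
  else parts
termination_by parts.length - i
decreasing_by
  · simp [List.length_take, List.length_drop]; omega
  · omega

def reduce_parts (parts : List String) : List String :=
  reduceLoop (PySem.List.sorted parts (fun x => -(PySem.Str.len x : Int)) false) 0

-- ===== PORT B =====
-- word-break DP from Source B: dp[i] == target[:i] is a concatenation of parts
def decompStep (target : List Char) (parts : List (List Char)) (dp : List Bool) (i : Nat) : List Bool :=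
  dp ++ [parts.any (fun p =>
    decide (1 ≤ p.length) && decide (p.length ≤ i) && dp.getD (i - p.length) false &&
    decide ((target.take i).drop (i - p.length) = p))]   -- target[i-len(p):i] == p (0 ≤ i-len(p) ≤ i ≤ n: exact)

def decomposable (target : String) (parts : List String) : Bool :=
  let t := target.toList
  let dp := (List.range' 1 t.length).foldl (decompStep t (parts.map String.toList)) [true]  -- range(1, n+1)
  dp.getD t.length false

-- '[t for i, t in enumerate(ps) if not decomposable(t, ps[i+1:])]' as recursion on suffixes
def reduceGo : List String → List String
  | [] => []
  | t :: rest => if decomposable t rest then reduceGo rest else t :: reduceGo rest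

def reduce_parts_alt (parts : List String) : List String :=
  reduceGo (PySem.List.sorted parts (fun x => -(PySem.Str.len x : Int)) false)

-- ===== PRECONDITION & SPEC =====
-- Pre_ excludes lists containing the empty string: there A's BFS re-enqueues the empty prefix
-- forever and diverges whenever some part is not decomposable (e.g. ["a", ""]); on the inputs with
-- "" where A does return (e.g. [""]) keeping the empty string is an accident of its BFS needing
-- at least one concatenation step, and B returns without it.
def Pre_reduce_parts (parts : List String) : Prop := ¬ ("" ∈ parts)
instance (parts : List String) : Decidable (Pre_reduce_parts parts) := by
  unfold Pre_reduce_parts; infer_instance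

def pvWitness_reduce_parts : List String := ["ab", "a", "b", "abc"]

def Spec_reduce_parts (parts : List String) (out : List String) : Prop := out = reduce_parts_alt parts
instance (parts : List String) (out : List String) : Decidable (Spec_reduce_parts parts out) := by unfold Spec_reduce_parts; infer_instance

-- ===== CLAIM (what is proved, stated in full; the proofs are below) =====
def Claim_equal_reduce_parts : Prop := ∀ (parts : List String), Dom_reduce_parts parts → Pre_reduce_parts parts → Spec_reduce_parts parts (reduce_parts parts)

-- ===== LEMMAS AND PROOFS =====

-- a queue entry q can reach the target by appending at least one part
def CanReach (target : List Char) (parts : List (List Char)) (q : List Char) : Prop :=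
  ∃ l : List (List Char), (∀ p ∈ l, p ∈ parts) ∧ l ≠ [] ∧ q ++ l.flatten = target

-- target[:i] is a concatenation of (possibly zero) parts
def Dcomp (target : List Char) (parts : List (List Char)) (i : Nat) : Prop :=
  ∃ l : List (List Char), (∀ p ∈ l, p ∈ parts) ∧ l.flatten = target.take i

-- the children a BFS step enqueues for node `current`
def children (target current : List Char) (ps : List (List Char)) : List (List Char) :=
  (ps.filter (fun p => !decide (current ++ p = target) &&
     PySem.Chars.startswith target (current ++ p))).map (fun p => current ++ p)

-- potential of a queue: an upper bound on the number of future BFS pops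
def weight (target : List Char) (parts : List (List Char)) (queue : List (List Char)) : Nat :=
  (queue.map (fun q => (parts.length + 1) ^ (target.length - q.length))).sum

lemma searchInner_eq (target current : List Char) (ps space : List (List Char)) :
    searchInner target current ps space =
      if ∃ p ∈ ps, current ++ p = target then none
      else some (space ++ children target current ps) := by
  induction ps generalizing space with
  | nil => simp [searchInner, children]
  | cons p ps ih =>
    simp only [searchInner, children, List.filter_cons]
    by_cases h1 : current ++ p = target
    · simp [h1]
    · by_cases h2 : PySem.Chars.startswith target (current ++ p) = true
      · simp [h1, h2, ih, children]
      · simp [h1, h2, ih, children]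

lemma mem_children {target current : List Char} {ps : List (List Char)} {c : List Char} :
    c ∈ children target current ps ↔
      ∃ p ∈ ps, c = current ++ p ∧ current ++ p ≠ target ∧ (current ++ p) <+: target := by
  simp only [children, List.mem_map, List.mem_filter, Bool.and_eq_true, Bool.not_eq_true',
    decide_eq_false_iff_not, PySem.Chars.startswith_iff]
  constructor
  · rintro ⟨p, ⟨hp, hne, hpre⟩, rfl⟩; exact ⟨p, hp, rfl, hne, hpre⟩
  · rintro ⟨p, hp, rfl, hne, hpre⟩; exact ⟨p, ⟨hp, hne, hpre⟩, rfl⟩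

lemma child_weight_lt (target : List Char) (parts : List (List Char))
    (hne : ∀ p ∈ parts, p ≠ ([] : List Char)) (current : List Char) :
    weight target parts (children target current parts) <
      (parts.length + 1) ^ (target.length - current.length) := by
  by_cases hc : target.length ≤ current.length
  · -- no children: current ++ p is longer than target, so startswith is false
    have hemp : children target current parts = [] := by
      simp only [children, List.map_eq_nil_iff, List.filter_eq_nil_iff]
      intro p hp
      have hp1 : 1 ≤ p.length := List.length_pos_iff.2 (hne p hp)
      intro hcontra
      simp only [Bool.and_eq_true, PySem.Chars.startswith_iff] at hcontra
      have := hcontra.2.length_le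
      simp at this; omega
    simp [hemp, weight]
  · rw [not_le] at hc
    -- each child's weight term is ≤ (P+1)^(n - |current| - 1), and there are ≤ P children
    set P := parts.length with hP
    set n := target.length with hn
    have hbound : ∀ x ∈ (children target current parts).map
        (fun q => (P + 1) ^ (n - q.length)), x ≤ (P + 1) ^ (n - current.length - 1) := by
      intro x hx
      rw [List.mem_map] at hx
      obtain ⟨q, hq, rfl⟩ := hx
      obtain ⟨p, hp, rfl⟩ := List.mem_map.1 hq
      have hpmem := List.mem_of_mem_filter hp
      have hp1 : 1 ≤ p.length := List.length_pos_iff.2 (hne p hpmem)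
      apply Nat.pow_le_pow_right (by omega)
      simp; omega
    have hlen : ((children target current parts).map
        (fun q => (P + 1) ^ (n - q.length))).length ≤ P := by
      simp only [List.length_map, children, List.length_map]
      exact le_trans (List.length_filter_le _ _) le_rfl
    have hsum := List.sum_le_card_nsmul _ _ hbound
    have : weight target parts (children target current parts) ≤ P * (P + 1) ^ (n - current.length - 1) := by
      unfold weight
      calc _ ≤ _ := hsum
        _ ≤ P * (P + 1) ^ (n - current.length - 1) := by
            rw [smul_eq_mul]; exact Nat.mul_le_mul_right _ hlen
    have hpow : (P + 1) ^ (n - current.length) = (P + 1) ^ (n - current.length - 1) * (P + 1) := by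
      rw [← pow_succ]; congr 1; omega
    have hpos : 1 ≤ (P + 1) ^ (n - current.length - 1) := Nat.one_le_pow _ _ (by omega)
    calc weight target parts (children target current parts)
        ≤ P * (P + 1) ^ (n - current.length - 1) := this
      _ < (P + 1) ^ (n - current.length - 1) * (P + 1) := by nlinarith
      _ = (P + 1) ^ (n - current.length) := hpow.symm



lemma weight_append (target : List Char) (parts : List (List Char)) (a b : List (List Char)) :
    weight target parts (a ++ b) = weight target parts a + weight target parts b := by
  simp [weight]

lemma weight_cons (target : List Char) (parts : List (List Char)) (c : List Char) (rest : List (List Char)) :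
    weight target parts (c :: rest) =
      (parts.length + 1) ^ (target.length - c.length) + weight target parts rest := by
  simp [weight]

lemma searchAux_iff (target : List Char) (parts : List (List Char))
    (hne : ∀ p ∈ parts, p ≠ ([] : List Char)) :
    ∀ (fuel : Nat) (queue : List (List Char)),
      weight target parts queue < fuel →
      (searchAux target parts fuel queue = true ↔ ∃ q ∈ queue, CanReach target parts q) := by
  intro fuel
  induction fuel with
  | zero => intro queue h; omega
  | succ fuel ih =>
    intro queue hw
    match queue with
    | [] => simp [searchAux]
    | c :: rest =>
      rw [searchAux, searchInner_eq]
      by_cases hex : ∃ p ∈ parts, c ++ p = target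
      · simp only [hex, if_true]
        constructor
        · intro _
          obtain ⟨p, hp, hcp⟩ := hex
          exact ⟨c, List.mem_cons_self, [p], by simpa using hp, by simp, by simpa using hcp⟩
        · intro _; trivial
      · simp only [hex, if_false]
        have hwlt : weight target parts (rest ++ children target c parts) < fuel := by
          rw [weight_append]
          have h1 := child_weight_lt target parts hne c
          rw [weight_cons] at hw
          omega
        rw [ih _ hwlt]
        constructor
        · rintro ⟨q, hq, hr⟩
          rcases List.mem_append.1 hq with hq | hq
          · exact ⟨q, List.mem_cons_of_mem _ hq, hr⟩
          · obtain ⟨p, hp, rfl, _, _⟩ := mem_children.1 hq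
            obtain ⟨l, hl, hlne, hflat⟩ := hr
            exact ⟨c, List.mem_cons_self, p :: l,
              by intro x hx; rcases List.mem_cons.1 hx with rfl | hx; exact hp; exact hl x hx,
              by simp, by simpa using hflat⟩
        · rintro ⟨q, hq, hr⟩
          rcases List.mem_cons.1 hq with rfl | hq
          · -- q = c : step to its child c ++ p
            obtain ⟨l, hl, hlne, hflat⟩ := hr
            match l, hlne with
            | p :: l', _ =>
              have hp : p ∈ parts := hl p List.mem_cons_self
              have hl' : l' ≠ [] := by
                rintro rfl
                exact hex ⟨p, hp, by simpa using hflat⟩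
              refine ⟨q ++ p, List.mem_append.2 (Or.inr (mem_children.2 ⟨p, hp, rfl, ?_, ?_⟩)),
                l', fun x hx => hl x (List.mem_cons_of_mem _ hx), hl', by simpa using hflat⟩
              · intro hqp
                exact hex ⟨p, hp, hqp⟩
              · refine ⟨l'.flatten, by simpa using hflat⟩
          · exact ⟨q, List.mem_append.2 (Or.inl hq), hr⟩

lemma search_iff (target : String) (parts : List String)
    (hne : ∀ p ∈ parts, p ≠ "") :
    (search target parts = true ↔
      ∃ l : List (List Char), (∀ p ∈ l, p ∈ parts.map String.toList) ∧ l ≠ [] ∧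
        l.flatten = target.toList) := by
  have hne' : ∀ p ∈ parts.map String.toList, p ≠ ([] : List Char) := by
    intro p hp
    obtain ⟨s, hs, rfl⟩ := List.mem_map.1 hp
    intro h
    exact hne s hs (by
      have : s.toList = ("" : String).toList := by simpa using h
      exact String.toList_injective this)
  rw [search, searchAux_iff target.toList (parts.map String.toList) hne' _ [[]]
    (by
      have : (parts.length + 1) ^ target.toList.length ≤ (parts.length + 1) ^ (target.toList.length + 1) :=
        Nat.pow_le_pow_right (by omega) (by omega)
      unfold weight
      simp only [List.map_cons, List.map_nil, List.sum_cons, List.sum_nil, List.length_nil,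
        Nat.sub_zero, List.length_map]
      omega)]
  unfold CanReach
  simp

def dpList (t : List Char) (ps : List (List Char)) (m : Nat) : List Bool :=
  (List.range' 1 m).foldl (decompStep t ps) [true]

lemma dp_spec (t : List Char) (ps : List (List Char)) (hne : ∀ p ∈ ps, p ≠ ([] : List Char)) :
    ∀ m, m ≤ t.length →
      (dpList t ps m).length = m + 1 ∧
        ∀ j, j ≤ m → ((dpList t ps m).getD j false = true ↔ Dcomp t ps j) := by
  intro m
  induction m with
  | zero =>
    intro _
    refine ⟨rfl, ?_⟩
    intro j hj
    interval_cases j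
    simp only [dpList, List.range'_zero, List.foldl_nil, List.getD_cons_zero, Dcomp, List.take_zero]
    simp only [true_iff]
    exact ⟨[], by simp, by simp⟩
  | succ m ih =>
    intro hm
    obtain ⟨ihlen, ihval⟩ := ih (by omega)
    have hstep : dpList t ps (m + 1) = decompStep t ps (dpList t ps m) (1 + m) := by
      rw [dpList, List.range'_concat, List.foldl_append, List.foldl_cons, List.foldl_nil, one_mul]
      rfl
    have hi : 1 + m = m + 1 := by omega
    rw [hi] at hstep
    constructor
    · rw [hstep, decompStep]; simp [ihlen]
    · intro j hj
      rcases Nat.lt_or_ge j (m + 1) with hjm | hjm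
      · rw [hstep, decompStep, List.getD_append _ _ _ _ (by omega)]
        exact ihval j (by omega)
      · have hj' : j = m + 1 := by omega
        subst hj'
        rw [hstep, decompStep]
        have hget : ((dpList t ps m) ++
            [ps.any (fun p =>
              decide (1 ≤ p.length) && decide (p.length ≤ (m+1)) &&
              (dpList t ps m).getD ((m+1) - p.length) false &&
              decide ((t.take (m+1)).drop ((m+1) - p.length) = p))]).getD (m+1) false =
            ps.any (fun p =>
              decide (1 ≤ p.length) && decide (p.length ≤ (m+1)) &&
              (dpList t ps m).getD ((m+1) - p.length) false &&
              decide ((t.take (m+1)).drop ((m+1) - p.length) = p)) := by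
          rw [List.getD_append_right _ _ _ _ (by omega)]
          simp [ihlen]
        rw [hget, List.any_eq_true]
        constructor
        · rintro ⟨p, hp, hcond⟩
          simp only [Bool.and_eq_true, decide_eq_true_eq] at hcond
          obtain ⟨⟨⟨hp1, hp2⟩, hdp⟩, hslice⟩ := hcond
          obtain ⟨l', hl', hflat'⟩ := (ihval ((m+1) - p.length) (by omega)).1 hdp
          refine ⟨l' ++ [p], ?_, ?_⟩
          · intro x hx
            rcases List.mem_append.1 hx with hx | hx
            · exact hl' x hx
            · simp at hx; subst hx; exact hp
          · rw [List.flatten_append, hflat']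
            have h1 : t.take ((m+1) - p.length) = (t.take (m+1)).take ((m+1) - p.length) := by
              rw [List.take_take]; congr 1; omega
            have h2 := List.take_append_drop ((m+1) - p.length) (List.take (m+1) t)
            rw [hslice] at h2
            rw [h1]
            simpa using h2
        · rintro ⟨l, hl, hflat⟩
          have hlen_take : (t.take (m+1)).length = m + 1 := by
            rw [List.length_take]; omega
          have hlne : l ≠ [] := by
            rintro rfl
            have := congrArg List.length hflat
            rw [hlen_take] at this
            simp at this
          rcases List.eq_nil_or_concat l with rfl | ⟨l', p, rfl⟩
          · exact absurd rfl hlne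
          · have hp : p ∈ ps := hl p (by simp)
            have hpne : p ≠ [] := hne p hp
            have hp1 : 1 ≤ p.length := List.length_pos_iff.2 hpne
            rw [List.concat_eq_append, List.flatten_append] at hflat
            simp only [List.flatten_cons, List.flatten_nil, List.append_nil] at hflat
            have hlensum : l'.flatten.length + p.length = m + 1 := by
              have := congrArg List.length hflat
              simpa [hlen_take] using this
            have hflen : l'.flatten.length = (m+1) - p.length := by omega
            refine ⟨p, hp, ?_⟩
            simp only [Bool.and_eq_true, decide_eq_true_eq]
            refine ⟨⟨⟨hp1, by omega⟩, ?_⟩, ?_⟩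
            · apply (ihval ((m+1) - p.length) (by omega)).2
              refine ⟨l', fun x hx => hl x (by simp [hx]), ?_⟩
              have : (t.take (m+1)).take ((m+1) - p.length) = l'.flatten := by
                rw [← hflat, ← hflen, List.take_left]
              rw [← this, List.take_take]
              congr 1; omega
            · rw [← hflat, ← hflen, List.drop_left]

lemma toList_ne_nil_of_ne_empty {s : String} (h : s ≠ "") : s.toList ≠ [] := by
  intro hl
  exact h (String.toList_injective (by simpa using hl))

lemma decomposable_iff (target : String) (parts : List String)
    (hne : ∀ p ∈ parts, p ≠ "") (htarget : target ≠ "") :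
    (decomposable target parts = true ↔
      ∃ l : List (List Char), (∀ p ∈ l, p ∈ parts.map String.toList) ∧ l ≠ [] ∧
        l.flatten = target.toList) := by
  have hne' : ∀ p ∈ parts.map String.toList, p ≠ ([] : List Char) := by
    intro p hp
    obtain ⟨s, hs, rfl⟩ := List.mem_map.1 hp
    exact toList_ne_nil_of_ne_empty (hne s hs)
  have ht : target.toList ≠ [] := toList_ne_nil_of_ne_empty htarget
  have heq : decomposable target parts =
      (dpList target.toList (parts.map String.toList) target.toList.length).getD
        target.toList.length false := rfl
  rw [heq, (dp_spec target.toList (parts.map String.toList) hne' _ le_rfl).2 _ le_rfl]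
  unfold Dcomp
  rw [List.take_length]
  constructor
  · rintro ⟨l, hl, hflat⟩
    refine ⟨l, hl, ?_, hflat⟩
    rintro rfl
    exact ht (by simpa using hflat.symm)
  · rintro ⟨l, hl, _, hflat⟩
    exact ⟨l, hl, hflat⟩

lemma search_eq_decomposable (target : String) (parts : List String)
    (hne : ∀ p ∈ parts, p ≠ "") (htarget : target ≠ "") :
    search target parts = decomposable target parts := by
  rcases h : decomposable target parts with _ | _
  · rcases h2 : search target parts with _ | _
    · rfl
    · exact absurd ((decomposable_iff target parts hne htarget).2
        ((search_iff target parts hne).1 h2)) (by simp [h])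
  · exact (search_iff target parts hne).2 ((decomposable_iff target parts hne htarget).1 h)

lemma reduceLoop_eq (parts : List String) (i : Nat)
    (hne : ∀ p ∈ parts, p ≠ "") :
    reduceLoop parts i = parts.take i ++ reduceGo (parts.drop i) := by
  induction parts, i using reduceLoop.induct with
  | case1 parts i h hs ih =>
    -- popped: parts.pop(i)
    rw [reduceLoop, dif_pos h, if_pos hs]
    have hne' : ∀ p ∈ parts.take i ++ parts.drop (i + 1), p ≠ "" := by
      intro p hp
      rcases List.mem_append.1 hp with hp | hp
      · exact hne p (List.mem_of_mem_take hp)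
      · exact hne p (List.mem_of_mem_drop hp)
    rw [ih hne']
    have hlt : (parts.take i).length = i := by simp; omega
    rw [List.take_left' hlt, List.drop_left' hlt]
    have hdrop : parts.drop i = parts[i] :: parts.drop (i + 1) := List.drop_eq_getElem_cons h
    have hdec : decomposable parts[i] (parts.drop (i + 1)) = true := by
      rw [← search_eq_decomposable _ _ (fun p hp => hne p (List.mem_of_mem_drop hp))
        (hne _ (List.getElem_mem h))]
      exact hs
    rw [hdrop, reduceGo, hdec, if_pos rfl]
  | case2 parts i h hs ih =>
    rw [reduceLoop, dif_pos h, if_neg (by simp [hs])]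
    rw [ih hne]
    have hdrop : parts.drop i = parts[i] :: parts.drop (i + 1) := List.drop_eq_getElem_cons h
    have hdec : decomposable parts[i] (parts.drop (i + 1)) = false := by
      rw [← search_eq_decomposable _ _ (fun p hp => hne p (List.mem_of_mem_drop hp))
        (hne _ (List.getElem_mem h))]
      exact Bool.eq_false_iff.2 hs
    rw [hdrop, reduceGo, hdec]
    simp only [Bool.false_eq_true, if_false]
    have h1 : List.take (i+1) parts = List.take i parts ++ [parts[i]] := by
      rw [List.take_add_one, List.getElem?_eq_getElem h]
      simp
    rw [h1, List.append_assoc, List.singleton_append]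
  | case3 parts i h =>
    rw [reduceLoop, dif_neg h]
    rw [List.drop_eq_nil_of_le (by omega), List.take_of_length_le (by omega)]
    simp [reduceGo]

-- ===== VERDICT (by name: the statement is the Claim_ definition above) =====
theorem reduce_parts_spec : Claim_equal_reduce_parts := by
  intro parts _ hpre
  unfold Spec_reduce_parts reduce_parts reduce_parts_alt
  have hne : ∀ p ∈ PySem.List.sorted parts (fun x => -(PySem.Str.len x : Int)) false, p ≠ "" := by
    intro p hp
    rw [PySem.List.mem_sorted] at hp
    exact fun h => hpre (h ▸ hp)
  simpa using reduceLoop_eq _ 0 hne
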